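-- pv_equiv track=rewrite | github.com/AlexTuisov/HW3 | HW3_submission/54_submission/hw3.py | node_score
-- ===== SOURCE A (Python) =====
-- def node_score(dict_state, zoc):
--     my_action_score = 0
--     rival_action_score = 0
--     for coordinate in dict_state:
--         if dict_state[coordinate][0] == 'S':
--             if coordinate in zoc:
--                 my_action_score -= 1
--             else:
--                 rival_action_score -= 1
--         elif dict_state[coordinate][0] == 'H' or dict_state[coordinate][0] == 'I':
--             if coordinate in zoc:
--                 my_action_score += 1
--             else:
--                 rival_action_score += 1
--         elif dict_state[coordinate][0] == 'Q':
--             if coordinate in zoc: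
--                 my_action_score -= 5
--             else:
--                 rival_action_score -= 5
--     return my_action_score - rival_action_score
-- ===== SOURCE B (Python) =====
-- def node_score(dict_state, zoc):
--     # Phase 1: histogram of (cell-type letter, zone membership); no scoring here.
--     cnt = {}
--     for coordinate, value in dict_state.items():
--         key = (value[0], coordinate in zoc)
--         cnt[key] = cnt.get(key, 0) + 1
--     # Phase 2: closed-form weighted combination of the bucket counts.
--     total = 0
--     for c, w in (('S', -1), ('H', 1), ('I', 1), ('Q', -5)):
--         total += w * (cnt.get((c, True), 0) - cnt.get((c, False), 0))
--     return total
-- ===== Notes on version B (the rewrite author's own statement) =====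
-- stated objective: alternative
-- what changed: Replaced A's single scoring pass with per-item branch arms and two accumulators by a two-phase algorithm: first build a frequency histogram keyed by (first letter, zone membership) with no scoring logic at all, then compute the score as a closed-form weighted combination of the eight bucket counts.
import Mathlib
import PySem

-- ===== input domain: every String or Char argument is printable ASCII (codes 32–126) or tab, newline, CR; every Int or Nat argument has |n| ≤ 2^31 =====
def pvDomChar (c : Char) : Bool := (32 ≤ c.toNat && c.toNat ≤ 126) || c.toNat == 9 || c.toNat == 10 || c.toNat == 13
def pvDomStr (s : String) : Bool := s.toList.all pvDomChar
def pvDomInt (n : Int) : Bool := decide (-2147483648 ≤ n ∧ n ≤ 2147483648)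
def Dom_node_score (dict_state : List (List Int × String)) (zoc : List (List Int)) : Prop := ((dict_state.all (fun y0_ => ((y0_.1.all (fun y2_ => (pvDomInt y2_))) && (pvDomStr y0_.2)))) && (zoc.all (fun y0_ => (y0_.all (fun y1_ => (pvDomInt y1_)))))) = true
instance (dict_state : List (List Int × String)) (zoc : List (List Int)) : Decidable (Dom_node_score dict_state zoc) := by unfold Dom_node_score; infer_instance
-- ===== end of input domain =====

-- B replaces A's single scoring pass (two accumulators, branch arms, final subtraction) by a
-- two-phase algorithm: a histogram keyed by (first letter, zone membership), then a closed-form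
-- weighted combination of the bucket counts; return values agree wherever A returns.

-- ===== PORT A =====
-- Two accumulators (my, rival); 'for coordinate in dict_state' iterates the dict's keys and
-- looks the value up; value[0] ported as pyGet? (Pre_ excludes the empty strings where Python raises).
def node_score (dict_state : List (List Int × String)) (zoc : List (List Int)) : Int :=
  let d := PySem.Dict.ofList dict_state
  let r := d.keys.foldl (fun (acc : Int × Int) coordinate =>
    let c0 := (PySem.Str.pyGet? (d.getD coordinate "") 0).getD ' '
    if c0 = 'S' then
      if coordinate ∈ zoc then (acc.1 - 1, acc.2) else (acc.1, acc.2 - 1)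
    else if c0 = 'H' ∨ c0 = 'I' then
      if coordinate ∈ zoc then (acc.1 + 1, acc.2) else (acc.1, acc.2 + 1)
    else if c0 = 'Q' then
      if coordinate ∈ zoc then (acc.1 - 5, acc.2) else (acc.1, acc.2 - 5)
    else acc) (0, 0)
  r.1 - r.2

-- ===== PORT B =====
-- Phase 1: histogram cnt keyed by (value[0], coordinate in zoc); phase 2: weighted sum of buckets.
def node_score_alt (dict_state : List (List Int × String)) (zoc : List (List Int)) : Int :=
  let d := PySem.Dict.ofList dict_state
  let cnt := d.items.foldl (fun (cnt : PySem.Dict (Char × Bool) Int) p =>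
    let key := ((PySem.Str.pyGet? p.2 0).getD ' ', decide (p.1 ∈ zoc))
    cnt.insert key (cnt.getD key 0 + 1)) PySem.Dict.empty
  [('S', (-1 : Int)), ('H', 1), ('I', 1), ('Q', -5)].foldl
    (fun total cw => total + cw.2 * (cnt.getD (cw.1, true) 0 - cnt.getD (cw.1, false) 0)) 0

-- ===== PRECONDITION & SPEC =====
-- Pre_ excludes exactly the inputs where Python A raises IndexError: a cell whose value is the
-- empty string (dict_state[coordinate][0]); B raises there too.
def Pre_node_score (dict_state : List (List Int × String)) (zoc : List (List Int)) : Prop :=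
  ∀ v ∈ (PySem.Dict.ofList dict_state).values, v ≠ ""
instance (dict_state : List (List Int × String)) (zoc : List (List Int)) : Decidable (Pre_node_score dict_state zoc) := by unfold Pre_node_score; infer_instance
def pvWitness_node_score : (List (List Int × String)) × List (List Int) :=
  ([([0, 0], "S"), ([0, 1], "H"), ([1, 1], "Q")], [[0, 0], [1, 1]])

def Spec_node_score (dict_state : List (List Int × String)) (zoc : List (List Int)) (out : Int) : Prop := out = node_score_alt dict_state zoc
instance (dict_state : List (List Int × String)) (zoc : List (List Int)) (out : Int) : Decidable (Spec_node_score dict_state zoc out) := by unfold Spec_node_score; infer_instance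

-- ===== CLAIM (what is proved, stated in full; the proofs are below) =====
def Claim_equal_node_score : Prop := ∀ (dict_state : List (List Int × String)) (zoc : List (List Int)), Dom_node_score dict_state zoc → Pre_node_score dict_state zoc → Spec_node_score dict_state zoc (node_score dict_state zoc)

-- ===== LEMMAS AND PROOFS =====

-- per-item signed weight: what one item contributes to (my - rival)
def nsWeight (c : Char) : Int :=
  if c = 'S' then -1 else if c = 'H' ∨ c = 'I' then 1 else if c = 'Q' then -5 else 0

def nsDelta (zoc : List (List Int)) (p : List Int × String) : Int :=
  (if p.1 ∈ zoc then 1 else -1) * nsWeight ((PySem.Str.pyGet? p.2 0).getD ' ')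

def nsKey (zoc : List (List Int)) (p : List Int × String) : Char × Bool :=
  ((PySem.Str.pyGet? p.2 0).getD ' ', decide (p.1 ∈ zoc))

-- A's loop body
def nsStepA (zoc : List (List Int)) (acc : Int × Int) (p : List Int × String) : Int × Int :=
  if (PySem.Str.pyGet? p.2 0).getD ' ' = 'S' then
    if p.1 ∈ zoc then (acc.1 - 1, acc.2) else (acc.1, acc.2 - 1)
  else if (PySem.Str.pyGet? p.2 0).getD ' ' = 'H' ∨ (PySem.Str.pyGet? p.2 0).getD ' ' = 'I' then
    if p.1 ∈ zoc then (acc.1 + 1, acc.2) else (acc.1, acc.2 + 1)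
  else if (PySem.Str.pyGet? p.2 0).getD ' ' = 'Q' then
    if p.1 ∈ zoc then (acc.1 - 5, acc.2) else (acc.1, acc.2 - 5)
  else acc

lemma nsStepA_diff (zoc : List (List Int)) (acc : Int × Int) (p : List Int × String) :
    (nsStepA zoc acc p).1 - (nsStepA zoc acc p).2 = acc.1 - acc.2 + nsDelta zoc p := by
  unfold nsStepA nsDelta nsWeight
  split_ifs <;> (try dsimp only) <;> omega

lemma nsFoldA (zoc : List (List Int)) :
    ∀ (l : List (List Int × String)) (acc : Int × Int),
      (l.foldl (nsStepA zoc) acc).1 - (l.foldl (nsStepA zoc) acc).2 =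
        acc.1 - acc.2 + ((l.map (nsDelta zoc)).sum) := by
  intro l
  induction l with
  | nil => intro acc; simp
  | cons p t ih =>
      intro acc
      simp only [List.foldl_cons, List.map_cons, List.sum_cons, ih, nsStepA_diff]
      ring

lemma nsDelta_key (zoc : List (List Int)) (p : List Int × String) :
    nsDelta zoc p = (if (nsKey zoc p).2 = true then 1 else -1) * nsWeight (nsKey zoc p).1 := by
  unfold nsDelta nsKey
  by_cases h : p.1 ∈ zoc <;> simp [h]

-- what one key contributes to the closed-form bucket combination
lemma nsKeyContrib (c : Char) (b : Bool) :
    (-1 : Int) * ((if c = 'S' ∧ b = true then (1 : Int) else 0) - (if c = 'S' ∧ b = false then 1 else 0))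
    + 1 * ((if c = 'H' ∧ b = true then (1 : Int) else 0) - (if c = 'H' ∧ b = false then 1 else 0))
    + 1 * ((if c = 'I' ∧ b = true then (1 : Int) else 0) - (if c = 'I' ∧ b = false then 1 else 0))
    + (-5 : Int) * ((if c = 'Q' ∧ b = true then (1 : Int) else 0) - (if c = 'Q' ∧ b = false then 1 else 0))
    = (if b = true then 1 else -1) * nsWeight c := by
  unfold nsWeight
  cases b <;>
    simp only [and_true, and_false, if_false, Bool.true_eq_false, Bool.false_eq_true,
      if_true] <;>
    split_ifs <;> simp_all

lemma nsCounts (zoc : List (List Int)) :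
    ∀ (l : List (List Int × String)),
      (-1 : Int) * (((l.map (nsKey zoc)).count ('S', true) : Int) - ((l.map (nsKey zoc)).count ('S', false) : Int))
      + 1 * (((l.map (nsKey zoc)).count ('H', true) : Int) - ((l.map (nsKey zoc)).count ('H', false) : Int))
      + 1 * (((l.map (nsKey zoc)).count ('I', true) : Int) - ((l.map (nsKey zoc)).count ('I', false) : Int))
      + (-5 : Int) * (((l.map (nsKey zoc)).count ('Q', true) : Int) - ((l.map (nsKey zoc)).count ('Q', false) : Int))
      = (l.map (nsDelta zoc)).sum := by
  intro l
  induction l with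
  | nil => simp
  | cons p t ih =>
      rcases hk : nsKey zoc p with ⟨c, b⟩
      simp only [List.map_cons, List.count_cons, List.sum_cons, hk, beq_iff_eq, Prod.mk.injEq]
      push_cast
      rw [← ih, nsDelta_key, hk]
      linarith [nsKeyContrib c b]

-- ===== VERDICT (by name: the statement is the Claim_ definition above) =====
theorem node_score_spec : Claim_equal_node_score := by
  intro ds zoc _ _
  unfold Spec_node_score
  have hnd : (PySem.Dict.ofList ds).keys.Nodup := PySem.Dict.nodup_keys_ofList ds
  have hitems := PySem.Dict.items_eq_map_keys (PySem.Dict.ofList ds) hnd ""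
  -- A as a fold of nsStepA over the items list
  have hA : node_score ds zoc =
      ((PySem.Dict.ofList ds).items.foldl (nsStepA zoc) ((0 : Int), (0 : Int))).1 -
        ((PySem.Dict.ofList ds).items.foldl (nsStepA zoc) ((0 : Int), (0 : Int))).2 := by
    rw [hitems, List.foldl_map]; rfl
  -- B's histogram loop, named with nsKey
  have hlam : (fun (cnt : PySem.Dict (Char × Bool) Int) (p : List Int × String) =>
        let key := ((PySem.Str.pyGet? p.2 0).getD ' ', decide (p.1 ∈ zoc))
        cnt.insert key (cnt.getD key 0 + 1)) =
      (fun (cnt : PySem.Dict (Char × Bool) Int) p =>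
        cnt.insert (nsKey zoc p) (cnt.getD (nsKey zoc p) 0 + 1)) := rfl
  -- each histogram lookup is a count in the key list
  have hcnt : ∀ k, (((PySem.Dict.ofList ds).items.foldl
      (fun (cnt : PySem.Dict (Char × Bool) Int) p =>
        cnt.insert (nsKey zoc p) (cnt.getD (nsKey zoc p) 0 + 1)) PySem.Dict.empty).getD k 0)
      = (((PySem.Dict.ofList ds).items.map (nsKey zoc)).count k : Int) := by
    intro k
    rw [show ((PySem.Dict.ofList ds).items.foldl
        (fun (cnt : PySem.Dict (Char × Bool) Int) p =>
          cnt.insert (nsKey zoc p) (cnt.getD (nsKey zoc p) 0 + 1)) PySem.Dict.empty) =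
      (((PySem.Dict.ofList ds).items.map (nsKey zoc)).foldl
        (fun (cnt : PySem.Dict (Char × Bool) Int) key =>
          cnt.insert key (cnt.getD key 0 + 1)) PySem.Dict.empty) from by rw [List.foldl_map],
      PySem.Dict.getD_foldl_insert_add_one]
    simp
  have hB : node_score_alt ds zoc =
      (-1 : Int) * ((((PySem.Dict.ofList ds).items.map (nsKey zoc)).count ('S', true) : Int) - (((PySem.Dict.ofList ds).items.map (nsKey zoc)).count ('S', false) : Int))
      + 1 * ((((PySem.Dict.ofList ds).items.map (nsKey zoc)).count ('H', true) : Int) - (((PySem.Dict.ofList ds).items.map (nsKey zoc)).count ('H', false) : Int))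
      + 1 * ((((PySem.Dict.ofList ds).items.map (nsKey zoc)).count ('I', true) : Int) - (((PySem.Dict.ofList ds).items.map (nsKey zoc)).count ('I', false) : Int))
      + (-5 : Int) * ((((PySem.Dict.ofList ds).items.map (nsKey zoc)).count ('Q', true) : Int) - (((PySem.Dict.ofList ds).items.map (nsKey zoc)).count ('Q', false) : Int)) := by
    unfold node_score_alt
    rw [hlam]
    simp only [List.foldl_cons, List.foldl_nil, hcnt]
    ring
  rw [hA, hB, nsCounts, nsFoldA]
  norm_num
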